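-- pv_equiv track=rewrite | github.com/josejoby/programming_questions | python/array_removal_minimum_cost.py | solve
-- ===== SOURCE A (Python) =====
-- def solve(A):
--     A.sort(reverse=True)
--     cost=0
--     arrsum = 0
--     for _ in range(len(A)):
--         arrsum +=A[_]
--     for _ in range(len(A)):
--         cost+=arrsum
--         arrsum-=A[_]
--     return cost
-- ===== SOURCE B (Python) =====
-- def solve(A):
--     A.sort(reverse=True)
--     return sum((i + 1) * a for i, a in enumerate(A))
-- ===== Notes on version B (the rewrite author's own statement) =====
-- stated objective: simpler
-- what changed: Replaces the two sequential loops (total-sum accumulation then shrinking suffix-sum accumulation) with a single closed-form rank-weighted sum: each element contributes (1-based position) * value; the in-place descending sort is kept so the argument is mutated identically.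
import Mathlib
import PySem

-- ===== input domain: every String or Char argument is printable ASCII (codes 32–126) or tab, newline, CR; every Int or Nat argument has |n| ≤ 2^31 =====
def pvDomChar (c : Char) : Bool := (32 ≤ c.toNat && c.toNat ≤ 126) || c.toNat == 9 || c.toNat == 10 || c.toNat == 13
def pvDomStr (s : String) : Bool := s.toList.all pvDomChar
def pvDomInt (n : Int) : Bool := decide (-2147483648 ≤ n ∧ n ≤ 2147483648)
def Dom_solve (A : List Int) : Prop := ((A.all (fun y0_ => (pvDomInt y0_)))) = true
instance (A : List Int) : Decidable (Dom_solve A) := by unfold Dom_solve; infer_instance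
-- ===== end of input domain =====

-- B replaces A's two accumulator loops with one closed-form rank-weighted sum (simpler; same cost).
-- Both implementations sort the argument in place; equivalence here is about the return value.

-- ===== PORT A =====
def solve (A : List Int) : Int :=
  let s := PySem.List.sorted A id true
  let arrsum :=
    (PySem.List.pyRange 0 (s.length : Int) 1).foldl
      (fun acc i => acc + PySem.List.pyGetD s i 0) 0
  let r :=
    (PySem.List.pyRange 0 (s.length : Int) 1).foldl
      (fun (p : Int × Int) i => (p.1 + p.2, p.2 - PySem.List.pyGetD s i 0)) (0, arrsum)
  r.1

-- ===== PORT B =====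
def solve_alt (A : List Int) : Int :=
  let s := PySem.List.sorted A id true
  ((PySem.List.enumerate s 0).map (fun p => (p.1 + 1) * p.2)).sum

-- ===== PRECONDITION & SPEC =====
def Spec_solve (A : List Int) (out : Int) : Prop := out = solve_alt A
instance (A : List Int) (out : Int) : Decidable (Spec_solve A out) := by unfold Spec_solve; infer_instance

-- ===== CLAIM (what is proved, stated in full; the proofs are below) =====
def Claim_equal_solve : Prop := ∀ (A : List Int), Dom_solve A → Spec_solve A (solve A)

-- ===== LEMMAS AND PROOFS =====

-- weight of each element by its distance from the end (0 for the last element)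
def pvU : List Int → Int
  | [] => 0
  | x :: s => (s.length : Int) * x + pvU s

theorem pvFoldA (s : List Int) (c t : Int) :
    (s.foldl (fun (p : Int × Int) x => (p.1 + p.2, p.2 - x)) (c, t)).1
      = c + (s.length : Int) * t - pvU s := by
  induction s generalizing c t with
  | nil => simp [pvU]
  | cons x s ih => simp [List.foldl_cons, ih, pvU]; push_cast; ring

theorem pvEnum (s : List Int) (k : Int) :
    ((PySem.List.enumerate s k).map (fun p => (p.1 + 1) * p.2)).sum
      = k * s.sum + (s.length : Int) * s.sum - pvU s := by
  induction s generalizing k with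
  | nil => simp [PySem.List.enumerate_nil, pvU]
  | cons x s ih => simp [PySem.List.enumerate_cons, ih, pvU]; push_cast; ring

theorem pvCore (s : List Int) :
    ((PySem.List.pyRange 0 (s.length : Int) 1).foldl
        (fun (p : Int × Int) i =>
          (p.1 + p.2, p.2 - PySem.List.pyGetD s i 0))
        (0, (PySem.List.pyRange 0 (s.length : Int) 1).foldl
              (fun acc i => acc + PySem.List.pyGetD s i 0) 0)).1
      = ((PySem.List.enumerate s 0).map (fun p => (p.1 + 1) * p.2)).sum := by
  rw [PySem.List.foldl_pyRange_zero_pyGetD' s 0 (fun acc x => acc + x) 0,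
      PySem.List.foldl_pyRange_zero_pyGetD' s 0
        (fun (p : Int × Int) x => (p.1 + p.2, p.2 - x)) _]
  rw [pvFoldA, pvEnum]
  have h : s.foldl (fun acc x => acc + x) 0 = s.sum := by rw [List.sum_eq_foldl]
  rw [h]; ring

theorem solve_eq_alt (A : List Int) : solve A = solve_alt A :=
  pvCore (PySem.List.sorted A id true)

-- ===== VERDICT (by name: the statement is the Claim_ definition above) =====
theorem solve_spec : Claim_equal_solve := by
  intro A _
  unfold Spec_solve
  exact solve_eq_alt A
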